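-- pv_equiv track=rewrite | github.com/SupanutT/hardest-courses-i-have-learned | Algorithm/ex05m2_connection/ex05m2_connection.py | BFS
-- ===== SOURCE A (Python) =====
-- from collections import deque
--
-- def BFS(G,s,lv):
--     curr_lv = 0
--     visited = [False]*len(G)
--     visited[s] = True
--     q = deque()
--     q.append(s)
--     q.append(None)
--     while (len(q) != 0) and (curr_lv < lv):
--         u = q.popleft()
--         if (u == None):
--             curr_lv += 1
--             q.append(None)
--             continue
--         for v in G[u]:
--             if not visited[v]:
--                 q.append(v)
--                 visited[v] = True
--     return sum(visited)
-- ===== SOURCE B (Python) =====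
-- def BFS(G, s, lv):
--     n = len(G)
--     reach = [False] * n
--     reach[s] = True
--     for _ in range(lv):
--         new = list(reach)
--         for u in range(n):
--             if reach[u]:
--                 for v in G[u]:
--                     new[v] = True
--         if new == reach:
--             break
--         reach = new
--     return sum(reach)
-- ===== Notes on version B (the rewrite author's own statement) =====
-- stated objective: alternative
-- what changed: Replaced A's queue-based BFS (deque with a None level sentinel and a per-node visited check before enqueueing) by a Bellman-Ford-style dense reachability relaxation: each round scans EVERY vertex u, unconditionally marking all neighbours of already-reached vertices into a fresh copy of the reach array, stopping after lv rounds or at the first fixed point; no queue or frontier exists.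
import Mathlib
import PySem

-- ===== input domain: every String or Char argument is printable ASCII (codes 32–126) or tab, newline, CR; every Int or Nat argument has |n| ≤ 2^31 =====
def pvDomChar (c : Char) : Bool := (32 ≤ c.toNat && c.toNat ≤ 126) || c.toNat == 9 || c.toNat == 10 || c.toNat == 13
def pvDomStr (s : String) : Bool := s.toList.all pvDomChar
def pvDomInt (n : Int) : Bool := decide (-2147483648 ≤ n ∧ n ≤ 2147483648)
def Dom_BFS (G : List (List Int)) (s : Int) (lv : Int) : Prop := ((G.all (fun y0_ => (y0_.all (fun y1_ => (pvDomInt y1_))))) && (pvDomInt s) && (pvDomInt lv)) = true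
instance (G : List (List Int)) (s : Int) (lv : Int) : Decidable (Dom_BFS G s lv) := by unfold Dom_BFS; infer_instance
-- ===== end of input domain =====

-- ===== PORT A =====
-- One honest line: B replaces A's queue BFS (deque + None level sentinel + visited check
-- before enqueue) by a dense fixed-point relaxation that rescans every vertex each round;
-- no queue or frontier.  Both ports are exact on Pre_BFS; outside Pre_ Python raises
-- IndexError, where the total ports no-op (pySetD / the `some false` match) instead.

-- visited[v]=True (no-op where Python would raise IndexError, excluded by Pre_)
def pvSetTrue (vis : List Bool) (i : Int) : List Bool := PySem.List.pySetD vis i true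

-- sum(visited)
def pvSumBool (vis : List Bool) : Int := vis.foldl (fun a b => a + (if b then 1 else 0)) 0

-- number of unvisited entries / of real (non-None) queue entries: termination measure only
def pvCF (vis : List Bool) : Nat := vis.countP (fun b => !b)
def pvCS (q : List (Option Int)) : Nat := q.countP (fun o => o.isSome)

-- A's inner loop: for v in G[u]: if not visited[v]: q.append(v); visited[v]=True
def innerA (vis : List Bool) (q : List (Option Int)) : List Int → List Bool × List (Option Int)
  | [] => (vis, q)
  | v :: ns =>
    match PySem.List.pyGet? vis v with
    | some false => innerA (pvSetTrue vis v) (q ++ [some v]) ns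
    | _ => innerA vis q ns

theorem countP_false_set (vis : List Bool) (n : Nat) (h : vis[n]? = some false) :
    pvCF (vis.set n true) + 1 = pvCF vis := by
  induction vis generalizing n with
  | nil => simp at h
  | cons a l ih =>
    cases n with
    | zero =>
      simp only [List.getElem?_cons_zero, Option.some.injEq] at h
      subst h; simp [pvCF]
    | succ m =>
      simp only [List.getElem?_cons_succ] at h
      simp only [List.set, pvCF, List.countP_cons] at *
      have := ih m h
      omega

theorem innerA_measure (ns : List Int) (vis : List Bool) (q : List (Option Int)) :
    pvCF (innerA vis q ns).1 + pvCS (innerA vis q ns).2 = pvCF vis + pvCS q := by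
  induction ns generalizing vis q with
  | nil => rfl
  | cons v ns ih =>
    simp only [innerA]
    cases h : PySem.List.pyGet? vis v with
    | none => exact ih vis q
    | some b =>
      cases b with
      | true => exact ih vis q
      | false =>
        rw [ih]
        cases hk : PySem.List.pyIdx? vis.length v with
        | none => simp [PySem.List.pyGet?, hk] at h
        | some n =>
          have hidx : vis[n]? = some false := by
            simpa [PySem.List.pyGet?, hk] using h
          have hset : pvSetTrue vis v = vis.set n true := by
            simp [pvSetTrue, PySem.List.pySetD, PySem.List.pySet?, hk]
          rw [hset]
          have h1 := countP_false_set vis n hidx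
          have h2 : pvCS (q ++ [some v]) = pvCS q + 1 := by
            simp [pvCS, List.countP_append]
          omega

theorem pvCS_cons_some (u : Int) (q : List (Option Int)) : pvCS (some u :: q) = pvCS q + 1 := by
  simp [pvCS]

-- A's while loop; state (curr_lv, visited, q)
def loopA (G : List (List Int)) (lv : Int) (c : Int) (vis : List Bool) (q : List (Option Int)) : List Bool :=
  if h : q ≠ [] ∧ c < lv then
    match q with
    | [] => vis
    | none :: q' => loopA G lv (c + 1) vis (q' ++ [none])
    | some u :: q' =>
      let p := innerA vis q' ((PySem.List.pyGet? G u).getD [])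
      loopA G lv c p.1 p.2
  else vis
termination_by ((lv - c).toNat, pvCF vis + pvCS q)
decreasing_by
  · exact Prod.Lex.left _ _ (by omega)
  · apply Prod.Lex.right'
    · omega
    · have h1 := innerA_measure ((PySem.List.pyGet? G u).getD []) vis q'
      rw [pvCS_cons_some]
      omega

def BFS (G : List (List Int)) (s : Int) (lv : Int) : Int :=
  let visited := pvSetTrue (List.replicate G.length false) s
  pvSumBool (loopA G lv 0 visited [some s, none])

-- ===== PORT B =====
-- Source B's innermost loop: for v in G[u]: new[v] = True (unconditional marking)
def denseInner (new : List Bool) (ns : List Int) : List Bool :=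
  ns.foldl (fun a v => pvSetTrue a v) new

-- Source B's per-round scan of ALL vertices: new = list(reach); for u in range(n): if reach[u]: …
def denseRound (G : List (List Int)) (reach : List Bool) : List Bool :=
  (List.range G.length).foldl
    (fun new u => if reach.getD u false then denseInner new (G.getD u []) else new) reach

-- Source B's outer loop: for _ in range(lv): …; if new == reach: break; reach = new
def loopD (G : List (List Int)) : Nat → List Bool → List Bool
  | 0, reach => reach
  | k + 1, reach =>
    let new := denseRound G reach
    if new = reach then reach else loopD G k new

def BFS_alt (G : List (List Int)) (s : Int) (lv : Int) : Int :=
  let reach := pvSetTrue (List.replicate G.length false) s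
  pvSumBool (loopD G lv.toNat reach)

-- ===== PRECONDITION & SPEC =====
-- Pre_ is exactly the no-raise domain of A: the source index is in [-len(G), len(G)) and no
-- node whose adjacency row A actually reads within the first lv levels has an entry outside
-- that range (Python raises IndexError on `visited[v]` otherwise).  `pvReachSet` is the plain
-- k-step reachability closure of the (index-normalised) graph, capped at len(G) steps.

-- normalised adjacency of node i: its row's entries as non-negative positions (bad ones dropped)
def pvNormAdj (G : List (List Int)) (i : Nat) : List Nat :=
  (G[i]?.getD []).filterMap (PySem.List.pyIdx? G.length)

-- S together with all normalised neighbours of members of S (no duplicates added)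
def pvExpandSet (G : List (List Int)) (S : List Nat) : List Nat :=
  S.foldl (fun acc i => (pvNormAdj G i).foldl (fun acc2 j => if j ∈ acc2 then acc2 else acc2 ++ [j]) acc) S

-- nodes reachable from s0 in at most k steps
def pvReachSet (G : List (List Int)) (s0 : Nat) : Nat → List Nat
  | 0 => [s0]
  | k + 1 => pvExpandSet G (pvReachSet G s0 k)

def Pre_BFS (G : List (List Int)) (s : Int) (lv : Int) : Prop :=
  PySem.Raise.InRange G.length s ∧
    (lv ≤ 0 ∨
      ∀ i ∈ pvReachSet G ((PySem.List.pyIdx? G.length s).getD 0) (min (lv - 1).toNat G.length),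
        ∀ v ∈ G[i]?.getD [], PySem.Raise.InRange G.length v)
instance (G : List (List Int)) (s : Int) (lv : Int) : Decidable (Pre_BFS G s lv) := by unfold Pre_BFS; infer_instance

def pvWitness_BFS : List (List Int) × Int × Int := ([[1], [0, -2]], 0, 2)

def Spec_BFS (G : List (List Int)) (s : Int) (lv : Int) (out : Int) : Prop := out = BFS_alt G s lv
instance (G : List (List Int)) (s : Int) (lv : Int) (out : Int) : Decidable (Spec_BFS G s lv out) := by unfold Spec_BFS; infer_instance

-- ===== CLAIM (what is proved, stated in full; the proofs are below) =====
def Claim_equal_BFS : Prop := ∀ (G : List (List Int)) (s : Int) (lv : Int), Dom_BFS G s lv → Pre_BFS G s lv → Spec_BFS G s lv (BFS G s lv)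

-- ===== LEMMAS AND PROOFS =====

-- Proof-layer intermediate: level-synchronous frontier BFS.  A's queue is proved to simulate
-- it (an old-fashioned frontier invariant), and it in turn is proved to compute the same
-- visited array as B's dense rounds.
def rowI (G : List (List Int)) (u : Int) : List Int := (PySem.List.pyGet? G u).getD []

def innerB (vis : List Bool) (nxt : List Int) : List Int → List Bool × List Int
  | [] => (vis, nxt)
  | v :: ns =>
    match PySem.List.pyGet? vis v with
    | some false => innerB (pvSetTrue vis v) (nxt ++ [v]) ns
    | _ => innerB vis nxt ns

def outerB (G : List (List Int)) (vis : List Bool) (nxt : List Int) : List Int → List Bool × List Int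
  | [] => (vis, nxt)
  | u :: us =>
    let p := innerB vis nxt (rowI G u)
    outerB G p.1 p.2 us

def loopB (G : List (List Int)) : Nat → List Bool → List Int → List Bool
  | 0, vis, _ => vis
  | k + 1, vis, front =>
    if front = [] then vis
    else
      let p := outerB G vis [] front
      loopB G k p.1 p.2

-- ---- stage 1: A's queue loop equals the frontier loop (as in a classical BFS argument) ----

theorem inner_rel (ns : List Int) (vis : List Bool) (Q : List (Option Int)) (nf : List Int) :
    innerA vis (Q ++ nf.map some) ns = ((innerB vis nf ns).1, Q ++ ((innerB vis nf ns).2).map some) := by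
  induction ns generalizing vis nf with
  | nil => rfl
  | cons v ns ih =>
    simp only [innerA, innerB]
    cases h : PySem.List.pyGet? vis v with
    | none => exact ih vis nf
    | some b =>
      cases b with
      | true => exact ih vis nf
      | false =>
        have : (Q ++ nf.map some) ++ [some v] = Q ++ (nf ++ [v]).map some := by simp
        rw [this]; exact ih (pvSetTrue vis v) (nf ++ [v])

theorem loopA_round (G : List (List Int)) (lv : Int) (front : List Int) :
    ∀ (vis : List Bool) (acc : List Int) (c : Int), c < lv →
    loopA G lv c vis (front.map some ++ none :: acc.map some) =
      loopA G lv (c + 1) (outerB G vis acc front).1 (((outerB G vis acc front).2).map some ++ [none]) := by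
  induction front with
  | nil =>
    intro vis acc c hc
    rw [loopA]
    simp [hc, outerB]
  | cons u us ih =>
    intro vis acc c hc
    rw [loopA]
    simp only [List.map_cons, List.cons_append, ne_eq, reduceCtorEq, not_false_eq_true, true_and, hc]
    have hq : us.map some ++ none :: acc.map some = (us.map some ++ [none]) ++ acc.map some := by simp
    rw [hq, inner_rel]
    have hq2 : (us.map some ++ [none]) ++ ((innerB vis acc (rowI G u)).2).map some
        = us.map some ++ none :: ((innerB vis acc (rowI G u)).2).map some := by simp
    rw [show ((PySem.List.pyGet? G u).getD [] : List Int) = rowI G u from rfl, hq2, ih _ _ _ hc]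
    rfl

theorem loopB_nil (G : List (List Int)) (k : Nat) (vis : List Bool) : loopB G k vis [] = vis := by
  cases k <;> rfl

theorem loopA_eq_loopB (G : List (List Int)) (lv : Int) :
    ∀ (k : Nat) (c : Int) (vis : List Bool) (front : List Int), (lv - c).toNat = k →
    loopA G lv c vis (front.map some ++ [none]) = loopB G k vis front := by
  intro k
  induction k with
  | zero =>
    intro c vis front hk
    rw [loopA]
    have : ¬ c < lv := by omega
    simp [this, loopB]
  | succ k ih =>
    intro c vis front hk
    have hc : c < lv := by omega
    by_cases hf : front = []
    · subst hf
      rw [loopA]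
      simp only [List.map_nil, List.nil_append, ne_eq, reduceCtorEq, not_false_eq_true, true_and, hc]
      have : ([none] : List (Option Int)) = ([] : List Int).map some ++ [none] := rfl
      rw [this, ih (c + 1) vis [] (by omega), loopB_nil, loopB_nil]
      simp
    · have h0 : front.map some ++ [none] = front.map some ++ none :: ([] : List Int).map some := rfl
      rw [h0, loopA_round G lv front vis [] c hc, ih (c + 1) _ _ (by omega)]
      rw [loopB]
      simp [hf]

-- ---- stage 2: the frontier loop equals B's dense rounds ----

theorem pyIdx_lt {n : Nat} {v : Int} {j : Nat} (h : PySem.List.pyIdx? n v = some j) : j < n := by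
  unfold PySem.List.pyIdx? at h
  split_ifs at h <;> simp_all <;> omega

theorem mark_length (vis : List Bool) (v : Int) : (pvSetTrue vis v).length = vis.length :=
  PySem.List.length_pySetD vis v true

theorem mark_get (vis : List Bool) (v : Int) (j : Nat) :
    (pvSetTrue vis v)[j]? =
      if PySem.List.pyIdx? vis.length v = some j then some true else vis[j]? := by
  unfold pvSetTrue PySem.List.pySetD PySem.List.pySet?
  cases h : PySem.List.pyIdx? vis.length v with
  | none => simp [h]
  | some k =>
    have hk : k < vis.length := pyIdx_lt h
    simp only [h, Option.map_some, Option.getD_some, List.getElem?_set, Option.some.injEq]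
    by_cases hj : k = j
    · subst hj; simp [hk]
    · simp [hj, Ne.symm hj]

theorem set_true_self (vis : List Bool) (j : Nat) (h : vis[j]? = some true) :
    vis.set j true = vis := by
  apply List.ext_getElem?
  intro i
  rw [List.getElem?_set]
  by_cases hij : j = i
  · subst hij
    obtain ⟨hj, he⟩ := List.getElem?_eq_some_iff.mp h
    simp [hj, he]
  · simp [hij]

theorem denseInner_length (ns : List Int) (vis : List Bool) :
    (denseInner vis ns).length = vis.length := by
  induction ns generalizing vis with
  | nil => rfl
  | cons v ns ih => simp only [denseInner, List.foldl_cons] at *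
                    rw [ih]; exact mark_length vis v

theorem denseInner_mono (ns : List Int) (vis : List Bool) (j : Nat)
    (h : vis[j]? = some true) : (denseInner vis ns)[j]? = some true := by
  induction ns generalizing vis with
  | nil => exact h
  | cons v ns ih =>
    simp only [denseInner, List.foldl_cons] at *
    apply ih
    rw [mark_get]
    split <;> simp [h]

theorem denseInner_mem (ns : List Int) (vis : List Bool) (v : Int) (j : Nat)
    (hv : v ∈ ns) (hj : PySem.List.pyIdx? vis.length v = some j) :
    (denseInner vis ns)[j]? = some true := by
  induction ns generalizing vis with
  | nil => simp at hv
  | cons w ns ih =>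
    simp only [denseInner, List.foldl_cons] at *
    rcases List.mem_cons.mp hv with rfl | hv
    · apply denseInner_mono
      rw [mark_get, if_pos hj]
    · exact ih _ hv (by rw [mark_length]; exact hj)

theorem denseInner_not (ns : List Int) (vis : List Bool) (j : Nat)
    (h : ∀ v ∈ ns, PySem.List.pyIdx? vis.length v ≠ some j) :
    (denseInner vis ns)[j]? = vis[j]? := by
  induction ns generalizing vis with
  | nil => rfl
  | cons w ns ih =>
    simp only [denseInner, List.foldl_cons] at *
    rw [ih _ (fun v hv => by rw [mark_length]; exact h v (List.mem_cons_of_mem _ hv)),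
        mark_get, if_neg (h w (List.mem_cons_self ..))]

theorem denseInner_false (ns : List Int) (vis : List Bool) (j : Nat)
    (h : (denseInner vis ns)[j]? = some false) : vis[j]? = some false := by
  cases hv : vis[j]? with
  | none =>
    exfalso
    have hlt : vis.length ≤ j := List.getElem?_eq_none_iff.mp hv
    rw [List.getElem?_eq_none_iff.mpr (by rw [denseInner_length]; exact hlt)] at h
    cases h
  | some b => cases b with
    | true => rw [denseInner_mono ns vis j hv] at h; simp at h
    | false => rfl

theorem mark_eq_self_of_true (vis : List Bool) (v : Int) (h : PySem.List.pyGet? vis v = some true) :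
    pvSetTrue vis v = vis := by
  unfold PySem.List.pyGet? at h
  cases hk : PySem.List.pyIdx? vis.length v with
  | none => simp [pvSetTrue, PySem.List.pySetD, PySem.List.pySet?, hk]
  | some k =>
    rw [hk] at h
    simp only [Option.bind_some] at h
    simp only [pvSetTrue, PySem.List.pySetD, PySem.List.pySet?, hk, Option.map_some, Option.getD_some]
    exact set_true_self vis k h

theorem mark_eq_self_of_none (vis : List Bool) (v : Int) (h : PySem.List.pyGet? vis v = none) :
    pvSetTrue vis v = vis := by
  unfold PySem.List.pyGet? at h
  cases hk : PySem.List.pyIdx? vis.length v with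
  | none => simp [pvSetTrue, PySem.List.pySetD, PySem.List.pySet?, hk]
  | some k =>
    exfalso
    rw [hk] at h
    simp only [Option.bind_some] at h
    rw [List.getElem?_eq_none_iff] at h
    exact absurd (pyIdx_lt hk) (by omega)

def frontRound (G : List (List Int)) (vis : List Bool) (front : List Int) : List Bool :=
  front.foldl (fun a u => denseInner a (rowI G u)) vis

theorem innerB_fst (ns : List Int) (vis : List Bool) (nxt : List Int) :
    (innerB vis nxt ns).1 = denseInner vis ns := by
  induction ns generalizing vis nxt with
  | nil => rfl
  | cons v ns ih =>
    simp only [innerB, denseInner, List.foldl_cons]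
    cases h : PySem.List.pyGet? vis v with
    | none => rw [ih]; unfold denseInner; rw [mark_eq_self_of_none vis v h]
    | some b =>
      cases b with
      | true => rw [ih]; unfold denseInner; rw [mark_eq_self_of_true vis v h]
      | false => exact ih _ _

theorem outerB_fst (front : List Int) (G : List (List Int)) (vis : List Bool) (nxt : List Int) :
    (outerB G vis nxt front).1 = frontRound G vis front := by
  induction front generalizing vis nxt with
  | nil => rfl
  | cons u us ih =>
    simp only [outerB, frontRound, List.foldl_cons]
    rw [ih, innerB_fst]
    rfl

theorem frontRound_length (front : List Int) (G : List (List Int)) (vis : List Bool) :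
    (frontRound G vis front).length = vis.length := by
  induction front generalizing vis with
  | nil => rfl
  | cons u us ih =>
    simp only [frontRound, List.foldl_cons] at *
    rw [ih, denseInner_length]

theorem frontRound_mono (front : List Int) (G : List (List Int)) (vis : List Bool) (j : Nat)
    (h : vis[j]? = some true) : (frontRound G vis front)[j]? = some true := by
  induction front generalizing vis with
  | nil => exact h
  | cons u us ih =>
    simp only [frontRound, List.foldl_cons] at *
    exact ih _ (denseInner_mono _ _ _ h)

theorem frontRound_mem (front : List Int) (G : List (List Int)) (vis : List Bool)
    (u : Int) (v : Int) (j : Nat) (hu : u ∈ front) (hv : v ∈ rowI G u)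
    (hj : PySem.List.pyIdx? vis.length v = some j) :
    (frontRound G vis front)[j]? = some true := by
  induction front generalizing vis with
  | nil => simp at hu
  | cons w us ih =>
    simp only [frontRound, List.foldl_cons] at *
    rcases List.mem_cons.mp hu with rfl | hu
    · exact frontRound_mono us G _ j (denseInner_mem _ _ _ _ hv hj)
    · exact ih _ hu (by rw [denseInner_length]; exact hj)

theorem frontRound_not (front : List Int) (G : List (List Int)) (vis : List Bool) (j : Nat)
    (h : ∀ u ∈ front, ∀ v ∈ rowI G u, PySem.List.pyIdx? vis.length v ≠ some j) :
    (frontRound G vis front)[j]? = vis[j]? := by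
  induction front generalizing vis with
  | nil => rfl
  | cons w us ih =>
    simp only [frontRound, List.foldl_cons] at *
    rw [ih _ (fun u hu v hv => by
          rw [denseInner_length]; exact h u (List.mem_cons_of_mem _ hu) v hv),
        denseInner_not _ _ _ (fun v hv => h w (List.mem_cons_self ..) v hv)]

def densePart (G : List (List Int)) (reach : List Bool) (new : List Bool) (us : List Nat) : List Bool :=
  us.foldl (fun new u => if reach.getD u false then denseInner new (G.getD u []) else new) new

theorem densePart_length (us : List Nat) (G : List (List Int)) (reach new : List Bool) :
    (densePart G reach new us).length = new.length := by
  induction us generalizing new with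
  | nil => rfl
  | cons u us ih =>
    simp only [densePart, List.foldl_cons] at *
    rw [ih]
    split
    · exact denseInner_length _ _
    · rfl

theorem densePart_mono (us : List Nat) (G : List (List Int)) (reach new : List Bool) (j : Nat)
    (h : new[j]? = some true) : (densePart G reach new us)[j]? = some true := by
  induction us generalizing new with
  | nil => exact h
  | cons u us ih =>
    simp only [densePart, List.foldl_cons] at *
    apply ih
    split
    · exact denseInner_mono _ _ _ h
    · exact h

theorem densePart_mem (us : List Nat) (G : List (List Int)) (reach new : List Bool)
    (u : Nat) (v : Int) (j : Nat) (hu : u ∈ us) (hr : reach.getD u false = true)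
    (hv : v ∈ G.getD u []) (hj : PySem.List.pyIdx? new.length v = some j) :
    (densePart G reach new us)[j]? = some true := by
  induction us generalizing new with
  | nil => simp at hu
  | cons w us ih =>
    simp only [densePart, List.foldl_cons] at *
    rcases List.mem_cons.mp hu with rfl | hu
    · rw [hr, if_pos rfl]
      exact densePart_mono us G reach _ j (denseInner_mem _ _ _ _ hv hj)
    · apply ih _ hu
      split
      · rw [denseInner_length]; exact hj
      · exact hj

theorem densePart_not (us : List Nat) (G : List (List Int)) (reach new : List Bool) (j : Nat)
    (h : ∀ u ∈ us, reach.getD u false = true → ∀ v ∈ G.getD u [], PySem.List.pyIdx? new.length v ≠ some j) :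
    (densePart G reach new us)[j]? = new[j]? := by
  induction us generalizing new with
  | nil => rfl
  | cons w us ih =>
    simp only [densePart, List.foldl_cons] at *
    cases hr : reach.getD w false with
    | false =>
      simp only [Bool.false_eq_true, if_false]
      exact ih _ (fun u hu hru v hv => h u (List.mem_cons_of_mem _ hu) hru v hv)
    | true =>
      simp only [if_pos rfl, if_true]
      rw [ih _ (fun u hu hru v hv => by
            rw [denseInner_length]; exact h u (List.mem_cons_of_mem _ hu) hru v hv),
          denseInner_not _ _ _ (fun v hv => h w (List.mem_cons_self ..) hr v hv)]

theorem denseRound_length (G : List (List Int)) (reach : List Bool) :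
    (denseRound G reach).length = reach.length := densePart_length _ _ _ _

theorem denseRound_mono (G : List (List Int)) (reach : List Bool) (j : Nat)
    (h : reach[j]? = some true) : (denseRound G reach)[j]? = some true :=
  densePart_mono _ _ _ _ _ h

theorem denseRound_mem (G : List (List Int)) (reach : List Bool) (u : Nat) (v : Int) (j : Nat)
    (hlen : reach.length = G.length)
    (hu : reach[u]? = some true) (hv : v ∈ G.getD u []) (hj : PySem.List.pyIdx? reach.length v = some j) :
    (denseRound G reach)[j]? = some true := by
  obtain ⟨hul, hue⟩ := List.getElem?_eq_some_iff.mp hu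
  apply densePart_mem _ G reach reach u v j
  · exact List.mem_range.mpr (by omega)
  · simp [List.getD, hu]
  · exact hv
  · exact hj

theorem denseRound_not (G : List (List Int)) (reach : List Bool) (j : Nat)
    (h : ∀ u : Nat, reach[u]? = some true → ∀ v ∈ G.getD u [], PySem.List.pyIdx? reach.length v ≠ some j) :
    (denseRound G reach)[j]? = reach[j]? := by
  apply densePart_not
  intro u hu hru v hv
  have : reach[u]? = some true := by
    cases hg : reach[u]? with
    | none => simp [List.getD, hg] at hru
    | some b => cases b with
      | true => rfl
      | false => simp [List.getD, hg] at hru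
  exact h u this v hv

theorem innerB_length (ns : List Int) (vis : List Bool) (nxt : List Int) :
    (innerB vis nxt ns).1.length = vis.length := by
  rw [innerB_fst]; exact denseInner_length _ _

theorem inner_snd_prefix (ns : List Int) (vis : List Bool) (nxt : List Int) :
    ∃ t, (innerB vis nxt ns).2 = nxt ++ t := by
  induction ns generalizing vis nxt with
  | nil => exact ⟨[], (List.append_nil _).symm⟩
  | cons v ns ih =>
    simp only [innerB]
    cases h : PySem.List.pyGet? vis v with
    | none => exact ih vis nxt
    | some b =>
      cases b with
      | true => exact ih vis nxt
      | false =>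
        obtain ⟨t, ht⟩ := ih (pvSetTrue vis v) (nxt ++ [v])
        exact ⟨v :: t, by rw [ht]; simp⟩

theorem outer_snd_prefix (front : List Int) (G : List (List Int)) (vis : List Bool) (nxt : List Int) :
    ∃ t, (outerB G vis nxt front).2 = nxt ++ t := by
  induction front generalizing vis nxt with
  | nil => exact ⟨[], (List.append_nil _).symm⟩
  | cons u us ih =>
    simp only [outerB]
    obtain ⟨t1, ht1⟩ := inner_snd_prefix (rowI G u) vis nxt
    obtain ⟨t2, ht2⟩ := ih (innerB vis nxt (rowI G u)).1 (innerB vis nxt (rowI G u)).2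
    exact ⟨t1 ++ t2, by rw [ht2, ht1]; simp⟩

theorem inner_snd_new (ns : List Int) (vis : List Bool) (nxt : List Int) (v : Int)
    (h : v ∈ (innerB vis nxt ns).2) :
    v ∈ nxt ∨ ∃ j, PySem.List.pyIdx? vis.length v = some j ∧ vis[j]? = some false ∧
      (innerB vis nxt ns).1[j]? = some true := by
  induction ns generalizing vis nxt with
  | nil => exact Or.inl h
  | cons w ns ih =>
    simp only [innerB] at h ⊢
    cases hg : PySem.List.pyGet? vis w with
    | none => simp only [hg] at h ⊢; exact ih vis nxt h
    | some b =>
      cases b with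
      | true => simp only [hg] at h ⊢; exact ih vis nxt h
      | false =>
        simp only [hg] at h ⊢
        rcases ih (pvSetTrue vis w) (nxt ++ [w]) h with hmem | ⟨j, hj, hf, ht⟩
        · rcases List.mem_append.mp hmem with hmem | hmem
          · exact Or.inl hmem
          · -- v = w, newly discovered
            have hvw : v = w := by simpa using hmem
            subst hvw
            unfold PySem.List.pyGet? at hg
            cases hk : PySem.List.pyIdx? vis.length v with
            | none => rw [hk] at hg; cases hg
            | some k =>
              rw [hk] at hg
              simp only [Option.bind_some] at hg
              refine Or.inr ⟨k, rfl, hg, ?_⟩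
              rw [innerB_fst]
              apply denseInner_mono
              rw [mark_get, if_pos (by rw [hk])]
        · refine Or.inr ⟨j, ?_, ?_, ht⟩
          · rw [mark_length] at hj; exact hj
          · rw [mark_get] at hf
            split at hf
            · cases hf
            · exact hf

theorem outer_snd_new (front : List Int) (G : List (List Int)) (vis : List Bool) (nxt : List Int) (v : Int)
    (h : v ∈ (outerB G vis nxt front).2) :
    v ∈ nxt ∨ ∃ j, PySem.List.pyIdx? vis.length v = some j ∧ vis[j]? = some false ∧
      (outerB G vis nxt front).1[j]? = some true := by
  induction front generalizing vis nxt with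
  | nil => exact Or.inl h
  | cons u us ih =>
    simp only [outerB] at h ⊢
    rcases ih (innerB vis nxt (rowI G u)).1 (innerB vis nxt (rowI G u)).2 h with hmem | ⟨j, hj, hf, ht⟩
    · rcases inner_snd_new (rowI G u) vis nxt v hmem with hmem' | ⟨j, hj, hf, ht⟩
      · exact Or.inl hmem'
      · refine Or.inr ⟨j, hj, hf, ?_⟩
        rw [outerB_fst]
        apply frontRound_mono
        exact ht
    · refine Or.inr ⟨j, ?_, ?_, ht⟩
      · rw [innerB_length] at hj; exact hj
      · -- (innerB …).1[j]? = some false implies vis[j]? = some false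
        rw [innerB_fst] at hf
        exact denseInner_false _ _ _ hf

theorem inner_flip (ns : List Int) (vis : List Bool) (nxt : List Int) (j : Nat)
    (h0 : vis[j]? = some false) (h1 : (innerB vis nxt ns).1[j]? = some true) :
    ∃ v ∈ (innerB vis nxt ns).2, PySem.List.pyIdx? vis.length v = some j := by
  induction ns generalizing vis nxt with
  | nil => rw [show (innerB vis nxt []).1 = vis from rfl, h0] at h1; cases h1
  | cons w ns ih =>
    simp only [innerB] at h1 ⊢
    cases hg : PySem.List.pyGet? vis w with
    | none => simp only [hg] at h1 ⊢; exact ih vis nxt h0 h1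
    | some b =>
      cases b with
      | true => simp only [hg] at h1 ⊢; exact ih vis nxt h0 h1
      | false =>
        simp only [hg] at h1 ⊢
        by_cases hw : PySem.List.pyIdx? vis.length w = some j
        · -- w itself is the discoverer; it is in the final nxt.
          obtain ⟨t, ht⟩ := inner_snd_prefix ns (pvSetTrue vis w) (nxt ++ [w])
          refine ⟨w, ?_, hw⟩
          rw [ht]
          simp
        · have h0' : (pvSetTrue vis w)[j]? = some false := by
            rw [mark_get, if_neg hw]; exact h0
          obtain ⟨v, hv, hvj⟩ := ih (pvSetTrue vis w) (nxt ++ [w]) h0' h1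
          rw [mark_length] at hvj
          exact ⟨v, hv, hvj⟩

theorem outer_flip (front : List Int) (G : List (List Int)) (vis : List Bool) (nxt : List Int) (j : Nat)
    (h0 : vis[j]? = some false) (h1 : (outerB G vis nxt front).1[j]? = some true) :
    ∃ v ∈ (outerB G vis nxt front).2, PySem.List.pyIdx? vis.length v = some j := by
  induction front generalizing vis nxt with
  | nil => rw [show (outerB G vis nxt []).1 = vis from rfl, h0] at h1; cases h1
  | cons u us ih =>
    simp only [outerB] at h1 ⊢
    cases hp : ((innerB vis nxt (rowI G u)).1)[j]? with
    | none =>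
      exfalso
      have hj : vis.length ≤ j := by
        rw [← innerB_length (rowI G u) vis nxt]
        exact List.getElem?_eq_none_iff.mp hp
      rw [List.getElem?_eq_none_iff.mpr hj] at h0
      cases h0
    | some b =>
      cases b with
      | true =>
        obtain ⟨v, hv, hvj⟩ := inner_flip (rowI G u) vis nxt j h0 hp
        obtain ⟨t, ht⟩ := outer_snd_prefix us G (innerB vis nxt (rowI G u)).1 (innerB vis nxt (rowI G u)).2
        refine ⟨v, ?_, hvj⟩
        rw [ht]
        exact List.mem_append_left _ hv
      | false =>
        obtain ⟨v, hv, hvj⟩ := ih (innerB vis nxt (rowI G u)).1 (innerB vis nxt (rowI G u)).2 hp h1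
        rw [innerB_length] at hvj
        exact ⟨v, hv, hvj⟩

def FrontOK (vis : List Bool) (front : List Int) : Prop :=
  ∀ u ∈ front, ∀ j, PySem.List.pyIdx? vis.length u = some j → vis[j]? = some true

def Closed (G : List (List Int)) (vis : List Bool) (front : List Int) : Prop :=
  ∀ j : Nat, vis[j]? = some true → (∀ u ∈ front, PySem.List.pyIdx? vis.length u ≠ some j) →
    ∀ v ∈ G.getD j [], ∀ i, PySem.List.pyIdx? vis.length v = some i → vis[i]? = some true

theorem rowI_eq (G : List (List Int)) (u : Int) (i : Nat)
    (h : PySem.List.pyIdx? G.length u = some i) : rowI G u = G.getD i [] := by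
  have hi : i < G.length := pyIdx_lt h
  unfold rowI PySem.List.pyGet?
  rw [h]
  simp [List.getD, List.getElem?_eq_getElem hi]

theorem pvRound_eq (G : List (List Int)) (vis : List Bool) (front : List Int)
    (hlen : vis.length = G.length) (hF : FrontOK vis front) (hC : Closed G vis front) :
    frontRound G vis front = denseRound G vis := by
  apply List.ext_getElem?
  intro j
  cases hv : vis[j]? with
  | none =>
    have hj : vis.length ≤ j := List.getElem?_eq_none_iff.mp hv
    rw [List.getElem?_eq_none_iff.mpr (by rw [frontRound_length]; exact hj),
        List.getElem?_eq_none_iff.mpr (by rw [denseRound_length]; exact hj)]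
  | some b =>
    cases b with
    | true => rw [frontRound_mono _ _ _ _ hv, denseRound_mono _ _ _ hv]
    | false =>
      by_cases hhit : ∃ u ∈ front, ∃ v ∈ rowI G u, PySem.List.pyIdx? vis.length v = some j
      · obtain ⟨u, hu, v, hvm, hvj⟩ := hhit
        rw [frontRound_mem _ _ _ _ _ _ hu hvm hvj]
        -- u's row is nonempty, so u normalises to some position i, marked by FrontOK
        have hg : PySem.List.pyGet? G u ≠ none := by
          intro hn
          rw [rowI, hn] at hvm
          simp at hvm
        cases hgu : PySem.List.pyGet? G u with
        | none => exact absurd hgu hg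
        | some r =>
          have hiu : ∃ i, PySem.List.pyIdx? G.length u = some i := by
            unfold PySem.List.pyGet? at hgu
            cases hk : PySem.List.pyIdx? G.length u with
            | none => rw [hk] at hgu; cases hgu
            | some i => exact ⟨i, rfl⟩
          obtain ⟨i, hiu⟩ := hiu
          have hmark : vis[i]? = some true := hF u hu i (by rw [hlen]; exact hiu)
          have hrow : v ∈ G.getD i [] := by rw [← rowI_eq G u i hiu]; exact hvm
          rw [denseRound_mem G vis i v j hlen hmark hrow hvj]
      · push_neg at hhit
        rw [frontRound_not _ _ _ _ (fun u hu v hv => hhit u hu v hv)]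
        rw [denseRound_not _ _ _ ?_, hv]
        intro u hu v hvm hvj
        by_cases hfu : ∃ uf ∈ front, PySem.List.pyIdx? vis.length uf = some u
        · obtain ⟨uf, hufm, hufj⟩ := hfu
          have : v ∈ rowI G uf := by
            rw [rowI_eq G uf u (by rw [← hlen]; exact hufj)]; exact hvm
          exact hhit uf hufm v this hvj
        · push_neg at hfu
          have := hC u hu (fun w hw => hfu w hw) v hvm j hvj
          rw [hv] at this
          cases this

theorem loopB_eq_loopD (G : List (List Int)) :
    ∀ (k : Nat) (vis : List Bool) (front : List Int), vis.length = G.length →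
      FrontOK vis front → Closed G vis front →
      loopB G k vis front = loopD G k vis := by
  intro k
  induction k with
  | zero => intro vis front _ _ _; rfl
  | succ k ih =>
    intro vis front hlen hF hC
    by_cases hf : front = []
    · subst hf
      rw [loopB_nil]
      have hd : denseRound G vis = vis := by
        apply List.ext_getElem?
        intro j
        cases hv : vis[j]? with
        | none =>
          rw [List.getElem?_eq_none_iff.mpr
            (by rw [denseRound_length]; exact List.getElem?_eq_none_iff.mp hv)]
        | some b =>
          cases b with
          | true => rw [denseRound_mono _ _ _ hv]
          | false =>
            rw [denseRound_not _ _ _ ?_]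
            · exact hv
            intro u hu v hvm hvj
            have := hC u hu (by simp) v hvm j hvj
            rw [hv] at this
            cases this
      have : loopD G (k + 1) vis = vis := by rw [loopD]; simp [hd]
      exact this.symm
    · have hfst : (outerB G vis [] front).1 = denseRound G vis := by
        rw [outerB_fst]
        exact pvRound_eq G vis front hlen hF hC
      have hlB : loopB G (k + 1) vis front = loopB G k (outerB G vis [] front).1 (outerB G vis [] front).2 := by
        rw [loopB]; simp [hf]
      by_cases hd : denseRound G vis = vis
      · have hp1 : (outerB G vis [] front).1 = vis := by rw [hfst, hd]
        have hp2 : (outerB G vis [] front).2 = [] := by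
          cases hp : (outerB G vis [] front).2 with
          | nil => rfl
          | cons v t =>
            exfalso
            have hv : v ∈ (outerB G vis [] front).2 := by rw [hp]; exact List.mem_cons_self ..
            rcases outer_snd_new front G vis [] v hv with hmem | ⟨j, _, hfalse, htrue⟩
            · simp at hmem
            · rw [hp1, hfalse] at htrue
              cases htrue
        rw [hlB, hp1, hp2, loopB_nil]
        have : loopD G (k + 1) vis = vis := by rw [loopD]; simp [hd]
        exact this.symm
      · have hDk : loopD G (k + 1) vis = loopD G k (denseRound G vis) := by
          rw [loopD]; simp [hd]
        rw [hlB, hDk, ← hfst]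
        apply ih
        · rw [hfst, denseRound_length]; exact hlen
        · -- FrontOK for the new frontier
          intro u hu j hj
          rcases outer_snd_new front G vis [] u hu with hmem | ⟨j0, hj0, _, htrue⟩
          · simp at hmem
          · have hlen' : (outerB G vis [] front).1.length = vis.length := by
              rw [hfst, denseRound_length]
            rw [hlen'] at hj
            rw [hj0] at hj
            cases hj
            exact htrue
        · -- Closed for the new state
          intro j hjt hnohit v hvm i hij
          have hlen' : (outerB G vis [] front).1.length = vis.length := by
            rw [hfst, denseRound_length]
          rw [hlen'] at hnohit hij
          cases hv : vis[j]? with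
          | none =>
            exfalso
            have : (outerB G vis [] front).1[j]? = none := by
              rw [List.getElem?_eq_none_iff, hlen']
              exact List.getElem?_eq_none_iff.mp hv
            rw [this] at hjt
            cases hjt
          | some b =>
            cases b with
            | false =>
              exfalso
              obtain ⟨w, hw, hwj⟩ := outer_flip front G vis [] j hv hjt
              exact hnohit w hw hwj
            | true =>
              by_cases hfu : ∃ uf ∈ front, PySem.List.pyIdx? vis.length uf = some j
              · obtain ⟨uf, hufm, hufj⟩ := hfu
                have hrow : v ∈ rowI G uf := by
                  rw [rowI_eq G uf j (by rw [← hlen]; exact hufj)]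
                  exact hvm
                rw [outerB_fst]
                exact frontRound_mem front G vis uf v i hufm hrow hij
              · push_neg at hfu
                have hvi : vis[i]? = some true := hC j hv (fun w hw => hfu w hw) v hvm i hij
                rw [outerB_fst]
                exact frontRound_mono front G vis i hvi

theorem init_len (G : List (List Int)) (s : Int) :
    (pvSetTrue (List.replicate G.length false) s).length = G.length := by
  rw [mark_length, List.length_replicate]

theorem init_frontOK (G : List (List Int)) (s : Int) :
    FrontOK (pvSetTrue (List.replicate G.length false) s) [s] := by
  intro u hu j hj
  have hus : u = s := by simpa using hu
  subst hus
  rw [init_len, ← List.length_replicate (n := G.length) (a := false)] at hj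
  rw [mark_get, if_pos hj]

theorem init_closed (G : List (List Int)) (s : Int) :
    Closed G (pvSetTrue (List.replicate G.length false) s) [s] := by
  intro j hjt hnohit v hvm i hij
  exfalso
  rw [mark_get] at hjt
  split at hjt
  · next hidx =>
    apply hnohit s (List.mem_cons_self ..)
    rw [init_len, ← List.length_replicate (n := G.length) (a := false)]
    exact hidx
  · rw [List.getElem?_replicate] at hjt
    split at hjt <;> cases hjt

-- ===== VERDICT (by name: the statement is the Claim_ definition above) =====
theorem BFS_spec : Claim_equal_BFS := by
  intro G s lv _ _
  unfold Spec_BFS BFS BFS_alt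
  show pvSumBool (loopA G lv 0 _ [some s, none]) = pvSumBool (loopD G lv.toNat _)
  have h : ([some s, none] : List (Option Int)) = [s].map some ++ [none] := rfl
  rw [h, loopA_eq_loopB G lv lv.toNat 0 _ [s] (by omega),
      loopB_eq_loopD G lv.toNat _ [s] (init_len G s) (init_frontOK G s) (init_closed G s)]
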